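-- pv_equiv track=rewrite | github.com/ZhichGaming/practice | ccc/2018/senior/S4.py | getTreeCount
-- ===== SOURCE A (Python) =====
-- mem = {}
--
-- def getTreeCount(weight):
--     if weight in mem:
--         return mem[weight]
--
--     if weight < 3:
--         return 1
--
--     res = 0
--
--     last_subtree = 1
--     each_weight = weight // 2
--     subtrees = weight // each_weight
--
--
--     while each_weight > 0:
--         # we are substracting because we aren't counting the weights but rather the number of possibilities we skipped by doing weight -1
--         res += getTreeCount(each_weight) * (subtrees - last_subtree)
--
--         last_subtree = subtrees
--         # This skips weights, but that is fine because we only want the possibilities of the maximum weights.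
--         each_weight = weight // (subtrees + 1)
--         # each_weight -= 1
--
--         if each_weight <= 0:
--             break
--
--         subtrees = weight // each_weight
--
--
--     mem[weight] = res
--     return res
-- ===== SOURCE B (Python) =====
-- mem = {}
--
-- def getTreeCount(weight):
--     if weight in mem:
--         return mem[weight]
--
--     if weight < 3:
--         return 1
--
--     res = 0
--     for s in range(2, weight + 1):
--         res += getTreeCount(weight // s)
--
--     mem[weight] = res
--     return res
-- ===== Notes on version B (the rewrite author's own statement) =====
-- stated objective: simpler
-- what changed: Replaces A's O(sqrt(w)) divisor-block grouping loop (tracking last_subtree/each_weight/subtrees and multiplying by block widths) with a plain scan that sums getTreeCount(weight // s) for every s from 2 to weight.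
import Mathlib
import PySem

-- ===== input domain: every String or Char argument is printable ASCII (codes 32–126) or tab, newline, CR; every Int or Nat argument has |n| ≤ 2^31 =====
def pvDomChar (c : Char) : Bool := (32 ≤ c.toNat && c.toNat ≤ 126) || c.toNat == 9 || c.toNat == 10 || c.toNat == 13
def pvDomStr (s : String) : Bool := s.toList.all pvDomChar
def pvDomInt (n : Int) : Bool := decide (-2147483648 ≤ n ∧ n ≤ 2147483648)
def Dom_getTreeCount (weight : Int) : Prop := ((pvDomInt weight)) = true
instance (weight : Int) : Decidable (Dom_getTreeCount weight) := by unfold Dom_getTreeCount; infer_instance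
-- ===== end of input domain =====

-- B replaces A's divisor-block grouping loop with a plain sum over s = 2..weight (simpler, not faster).
-- The global `mem` in both Pythons is a pure cache of already-computed values: it never changes
-- a returned value, so the ports compute the same recursion without it (fuel makes it total;
-- fuel weight.toNat + 1 always suffices, see the lemmas).

-- ===== PORT A =====
-- the while-loop of A: state (res, last_subtree, each_weight, subtrees); g is the recursive call
def gtcALoop (g : Int → Int) (w : Int) : Nat → Int → Int → Int → Int → Int
  | 0, res, _, _, _ => res
  | fuel+1, res, last, ew, st =>
    if ew > 0 then
      let res' := res + g ew * (st - last)
      let ew' := PySem.Int.floordiv w (st + 1)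
      if ew' ≤ 0 then res'
      else gtcALoop g w fuel res' st ew' (PySem.Int.floordiv w ew')
    else res

def gtcA : Nat → Int → Int
  | 0, _ => 0
  | fuel+1, w =>
    if w < 3 then 1
    else
      let ew := PySem.Int.floordiv w 2
      gtcALoop (gtcA fuel) w (fuel+1) 0 1 ew (PySem.Int.floordiv w ew)

def getTreeCount (weight : Int) : Int := gtcA (weight.toNat + 1) weight

-- ===== PORT B =====
-- B's body: res = 0; for s in range(2, weight+1): res += getTreeCount(weight // s)
def gtcB : Nat → Int → Int
  | 0, _ => 0
  | fuel+1, w =>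
    if w < 3 then 1
    else (PySem.List.pyRange 2 (w+1) 1).foldl
           (fun res s => res + gtcB fuel (PySem.Int.floordiv w s)) 0

def getTreeCount_alt (weight : Int) : Int := gtcB (weight.toNat + 1) weight

-- ===== PRECONDITION & SPEC =====
def Spec_getTreeCount (weight : Int) (out : Int) : Prop := out = getTreeCount_alt weight
instance (weight : Int) (out : Int) : Decidable (Spec_getTreeCount weight out) := by unfold Spec_getTreeCount; infer_instance

-- ===== CLAIM (what is proved, stated in full; the proofs are below) =====
def Claim_equal_getTreeCount : Prop := ∀ (weight : Int), Dom_getTreeCount weight → Spec_getTreeCount weight (getTreeCount weight)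

-- ===== LEMMAS AND PROOFS =====

-- the common mathematical value: G n = 1 for n < 3, else ∑_{s ∈ (1,n]} G (n / s)
def G (n : Nat) : Int :=
  if n < 3 then 1
  else ∑ s ∈ (Finset.Ioc 1 n).attach, G (n / s.1)
termination_by n
decreasing_by
  have hs := Finset.mem_Ioc.mp s.2
  exact Nat.div_lt_self (by omega) (by omega)

theorem G_eq (n : Nat) : G n = if n < 3 then 1 else ∑ s ∈ Finset.Ioc 1 n, G (n / s) := by
  rw [G]
  split
  · rfl
  · rw [← Finset.sum_attach (Finset.Ioc 1 n) (fun s => G (n / s))]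

-- the constant-quotient block: for l < s ≤ n/(n/(l+1)), n/s = n/(l+1)
theorem block_eq (n l s : Nat) (hl : l + 1 ≤ n) (hs1 : l < s) (hs2 : s ≤ n / (n / (l+1))) :
    n / s = n / (l+1) := by
  have he : 1 ≤ n / (l+1) := (Nat.one_le_div_iff (by omega)).mpr hl
  have ht : l + 1 ≤ n / (n / (l+1)) := by
    rw [Nat.le_div_iff_mul_le he]
    calc (l+1) * (n / (l+1)) = n / (l+1) * (l+1) := Nat.mul_comm _ _
      _ ≤ n := Nat.div_mul_le_self n (l+1)
  apply le_antisymm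
  · exact Nat.div_le_div_left (by omega) (by omega)
  · have h1 : n / (l+1) ≤ n / (n / (n / (l+1))) := by
      rw [Nat.le_div_iff_mul_le (by omega : 0 < n / (n / (l+1)))]
      rw [Nat.mul_comm]
      exact Nat.div_mul_le_self n (n / (l+1))
    exact h1.trans (Nat.div_le_div_left hs2 (by omega))

-- loop invariant for A's while-loop
theorem loopInv (g : Int → Int) (n : Nat) (_hn : 3 ≤ n)
    (hg : ∀ m : Nat, m < n → g (m : Int) = G m) :
    ∀ fuel l (res : Int), 1 ≤ l → l < n → n - l ≤ fuel →
      gtcALoop g (n : Int) fuel res (l : Int) ((n / (l+1) : Nat) : Int) ((n / (n / (l+1)) : Nat) : Int)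
        = res + ∑ s ∈ Finset.Ioc l n, G (n / s) := by
  intro fuel
  induction fuel with
  | zero => intro l res _ h2 h3; omega
  | succ fuel ih =>
    intro l res hl1 hl2 hfuel
    have he : 1 ≤ n / (l+1) := (Nat.one_le_div_iff (by omega)).mpr (by omega)
    have ht_ge : l + 1 ≤ n / (n / (l+1)) := by
      rw [Nat.le_div_iff_mul_le he]
      calc (l+1) * (n / (l+1)) = n / (l+1) * (l+1) := Nat.mul_comm _ _
        _ ≤ n := Nat.div_mul_le_self n (l+1)
    have ht_le : n / (n / (l+1)) ≤ n := Nat.div_le_self _ _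
    have he_lt : n / (l+1) < n := by
      have : n / (l+1) ≤ n / 2 := Nat.div_le_div_left (by omega) (by omega)
      omega
    have hblock : ∀ s ∈ Finset.Ioc l (n / (n / (l+1))), G (n / s) = G (n / (l+1)) := by
      intro s hs
      have hs' := Finset.mem_Ioc.mp hs
      rw [block_eq n l s (by omega) hs'.1 hs'.2]
    have hsum_block : ∑ s ∈ Finset.Ioc l (n / (n / (l+1))), G (n / s)
        = (((n / (n / (l+1)) : Nat) : Int) - (l : Int)) * G (n / (l+1)) := by
      rw [Finset.sum_congr rfl hblock, Finset.sum_const, Nat.card_Ioc, nsmul_eq_mul]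
      congr 1
      omega
    simp only [gtcALoop]
    have hepos : (((n / (l+1) : Nat)) : Int) > 0 := by exact_mod_cast he
    rw [if_pos hepos]
    have hge : g (((n / (l+1) : Nat)) : Int) = G (n / (l+1)) := hg _ he_lt
    have hfd : PySem.Int.floordiv (n : Int) (((n / (n / (l+1)) : Nat) : Int) + 1)
        = ((n / (n / (n / (l+1)) + 1) : Nat) : Int) := by
      have h := PySem.Int.floordiv_natCast n (n / (n / (l+1)) + 1)
      rw [← h]
      push_cast
      ring_nf
    rw [hfd]
    by_cases hend : n / (n / (l+1)) = n
    · have hz : n / (n / (n / (l+1)) + 1) = 0 := by rw [hend]; exact Nat.div_eq_of_lt (by omega)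
      rw [hz]
      rw [if_pos (by norm_num)]
      rw [hge]
      rw [hend] at hsum_block ⊢
      rw [hsum_block]
      ring
    · have ht_lt : n / (n / (l+1)) < n := by omega
      have hz : 1 ≤ n / (n / (n / (l+1)) + 1) := (Nat.one_le_div_iff (by omega)).mpr (by omega)
      have hz' : (0 : Int) < ((n / (n / (n / (l+1)) + 1) : Nat) : Int) := by exact_mod_cast hz
      rw [if_neg (not_le.mpr hz')]
      rw [PySem.Int.floordiv_natCast n (n / (n / (n / (l+1)) + 1))]
      rw [ih (n / (n / (l+1))) (res + g ((n / (l+1) : Nat) : Int) * (((n / (n / (l+1)) : Nat) : Int) - (l : Int)))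
            (by omega) ht_lt (by omega)]
      rw [← Finset.sum_Ioc_consecutive (fun s => G (n / s)) (by omega : l ≤ n / (n / (l+1)))
            (by omega : n / (n / (l+1)) ≤ n)]
      rw [hge, hsum_block]
      ring

-- list-sum / Finset-sum bridge
theorem sum_map_range (f : Nat → Int) (m : Nat) :
    ((List.range m).map f).sum = ∑ k ∈ Finset.range m, f k := by
  induction m with
  | zero => simp
  | succ m ih => rw [List.range_succ, Finset.sum_range_succ, List.map_append, List.sum_append, ih]; simp

theorem gtcB_eq_G (n : Nat) : ∀ f, n < f → gtcB f (n : Int) = G n := by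
  induction n using Nat.strong_induction_on with
  | _ n ih =>
    intro f hf
    obtain ⟨f, rfl⟩ : ∃ f', f = f' + 1 := ⟨f - 1, by omega⟩
    rw [gtcB]
    by_cases h3 : n < 3
    · rw [if_pos (by exact_mod_cast h3), G_eq, if_pos h3]
    · rw [if_neg (by exact_mod_cast h3), G_eq, if_neg h3]
      have hr : PySem.List.pyRange 2 ((n : Int) + 1) 1
          = (List.range (n - 1)).map (fun k : Nat => (2 : Int) + k) := by
        have ht : ((n : Int) + 1 - 2).toNat = n - 1 := by omega
        rw [PySem.List.pyRange_one, ht]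
      rw [hr, PySem.List.foldl_add, List.map_map]
      have hmap : ∀ k : Nat, gtcB f (PySem.Int.floordiv (n : Int) ((2 : Int) + k)) = G (n / (2 + k)) := by
        intro k
        have hc : ((2 : Int) + k) = (((2 + k : Nat)) : Int) := by push_cast; ring
        rw [hc, PySem.Int.floordiv_natCast]
        exact ih (n / (2 + k)) (Nat.div_lt_self (by omega) (by omega)) f
          (lt_of_lt_of_le (Nat.div_lt_self (by omega) (by omega)) (by omega))
      calc (0 : Int) + (((List.range (n-1)).map
              (fun k : Nat => gtcB f (PySem.Int.floordiv (n : Int) ((2 : Int) + k)))).sum)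
          = ((List.range (n-1)).map (fun k : Nat => G (n / (2 + k)))).sum := by
            rw [zero_add]
            congr 1
            exact List.map_congr_left (fun k _ => hmap k)
        _ = ∑ k ∈ Finset.range (n - 1), G (n / (2 + k)) := sum_map_range _ _
        _ = ∑ s ∈ Finset.Ico 2 (n + 1), G (n / s) := by
            rw [Finset.sum_Ico_eq_sum_range]
            congr 1
        _ = ∑ s ∈ Finset.Ioc 1 n, G (n / s) := by
            congr 1

theorem gtcA_eq_G (n : Nat) : ∀ f, n < f → gtcA f (n : Int) = G n := by
  induction n using Nat.strong_induction_on with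
  | _ n ih =>
    intro f hf
    obtain ⟨f, rfl⟩ : ∃ f', f = f' + 1 := ⟨f - 1, by omega⟩
    rw [gtcA]
    by_cases h3 : n < 3
    · rw [if_pos (by exact_mod_cast h3), G_eq, if_pos h3]
    · rw [if_neg (by exact_mod_cast h3)]
      have h2 : PySem.Int.floordiv (n : Int) 2 = ((n / 2 : Nat) : Int) := by
        exact_mod_cast PySem.Int.floordiv_natCast n 2
      have h2' : PySem.Int.floordiv (n : Int) ((n / 2 : Nat) : Int)
          = ((n / (n / 2) : Nat) : Int) := PySem.Int.floordiv_natCast n (n / 2)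
      simp only [h2, h2']
      have hg : ∀ m : Nat, m < n → gtcA f (m : Int) = G m := by
        intro m hm
        exact ih m hm f (by omega)
      have key := loopInv (gtcA f) n (by omega) hg (f + 1) 1 0 le_rfl (by omega) (by omega)
      simp only [show (1 : Nat) + 1 = 2 by norm_num, Nat.cast_one, zero_add] at key
      rw [key, G_eq, if_neg h3]

-- ===== VERDICT (by name: the statement is the Claim_ definition above) =====
theorem getTreeCount_spec : Claim_equal_getTreeCount := by
  intro w _hd
  unfold Spec_getTreeCount getTreeCount getTreeCount_alt
  by_cases h : w < 3
  · rw [gtcA, gtcB, if_pos h, if_pos h]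
  · have hw0 : 0 ≤ w := by omega
    have hwn : w = ((w.toNat : Nat) : Int) := by omega
    rw [hwn, Int.toNat_natCast]
    rw [gtcA_eq_G w.toNat (w.toNat + 1) (by omega), gtcB_eq_G w.toNat (w.toNat + 1) (by omega)]
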